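-- pv_equiv track=rewrite | github.com/samarthraj/Question_Solve | Mar_13_2025/Q4_130325.py | leader_array
-- ===== SOURCE A (Python) =====
-- def leader_array(arr):
--
--     #start from right and move left
--     max_element = float('-inf')
--     max_element_index = 0
--     index_arr = []
--     #index_dict = {}
--     for i in range(len(arr)-1, -1, -1):
--         if arr[i] >= max_element:
--             max_element = arr[i]
--             max_element_index = i
--             index_arr.append(0)
--             #index_dict[i] = 0
--             #index_dict[arr[i]] = 0
--         else:
--             index_arr.append(max_element_index - i)
--             #index_dict[i] = max_element_index - i
--             #index_dict[arr[i]] =  max_element_index - i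
--     index_arr.reverse()
--     return index_arr
-- ===== SOURCE B (Python) =====
-- def leader_array(arr):
--     n = len(arr)
--     # pass 1: collect the leader indices (arr[i] >= every element to its right),
--     # scanning right to left; the most recently appended index is the current
--     # leftmost position of the running suffix maximum.
--     leaders = []
--     for i in range(n - 1, -1, -1):
--         if not leaders or arr[i] >= arr[leaders[-1]]:
--             leaders.append(i)
--     leaders.reverse()  # increasing leader indices; the last one is n - 1
--     # pass 2: emit the distances run by run: every index i in (previous leader, l]
--     # has l as its nearest leader on the right, so it gets l - i.
--     out = []
--     prev = 0
--     for l in leaders: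
--         for i in range(prev, l + 1):
--             out.append(l - i)
--         prev = l + 1
--     return out
-- ===== Notes on version B (the rewrite author's own statement) =====
-- stated objective: alternative
-- what changed: Replaces A's single fused backward running-max loop (which tracks the current max and its index and emits a distance per step) by a two-phase decomposition: first collect the list of leader indices, then emit the distances run by run between consecutive leaders with a forward pass and no max tracking.
import Mathlib
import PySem

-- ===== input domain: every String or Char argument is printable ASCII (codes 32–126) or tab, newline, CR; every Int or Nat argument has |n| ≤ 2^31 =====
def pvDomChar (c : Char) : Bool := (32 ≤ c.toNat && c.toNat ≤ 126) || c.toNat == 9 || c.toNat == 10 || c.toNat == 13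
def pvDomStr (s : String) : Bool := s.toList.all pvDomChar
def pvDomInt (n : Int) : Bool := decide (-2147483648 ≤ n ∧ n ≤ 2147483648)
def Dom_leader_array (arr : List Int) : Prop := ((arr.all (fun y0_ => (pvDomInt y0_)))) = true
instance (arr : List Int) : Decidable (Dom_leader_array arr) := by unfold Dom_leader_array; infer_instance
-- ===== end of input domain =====

-- B replaces A's fused backward running-max loop by a two-phase decomposition:
-- collect the leader indices, then emit the distances run by run (same O(n) cost).

-- ===== PORT A =====
-- loop body of A's backward scan: state = (max_element, max_element_index, index_arr);
-- max_element = none models float('-inf')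
def pvStepA (arr : List Int) : (Option Int × Int × List Int) → Int → (Option Int × Int × List Int)
  | (maxE, maxI, acc), i =>
    if maxE.all (fun m => m ≤ PySem.List.pyGetD arr i 0) then
      (some (PySem.List.pyGetD arr i 0), i, acc ++ [0])
    else
      (maxE, maxI, acc ++ [maxI - i])

def leader_array (arr : List Int) : List Int :=
  ((PySem.List.pyRange ((arr.length : Int) - 1) (-1) (-1)).foldl (pvStepA arr) (none, 0, [])).2.2.reverse

-- ===== PORT B =====
-- pass 1 body: append i when leaders is empty or arr[i] >= arr[leaders[-1]]
def pvStepL (arr : List Int) (L : List Int) (i : Int) : List Int :=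
  if L = [] ∨ PySem.List.pyGetD arr (PySem.List.pyGetD L (-1) 0) 0 ≤ PySem.List.pyGetD arr i 0 then
    L ++ [i]
  else L

-- pass 2 body: state = (prev, out); emit l - i for every i in range(prev, l + 1)
def pvStepE (st : Int × List Int) (l : Int) : Int × List Int :=
  (l + 1, (PySem.List.pyRange st.1 (l + 1) 1).foldl (fun o i => o ++ [l - i]) st.2)

def leader_array_alt (arr : List Int) : List Int :=
  let leaders := ((PySem.List.pyRange ((arr.length : Int) - 1) (-1) (-1)).foldl (pvStepL arr) []).reverse
  (leaders.foldl pvStepE (0, [])).2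

-- ===== PRECONDITION & SPEC =====
def Spec_leader_array (arr : List Int) (out : List Int) : Prop := out = leader_array_alt arr
instance (arr : List Int) (out : List Int) : Decidable (Spec_leader_array arr out) := by unfold Spec_leader_array; infer_instance

-- ===== CLAIM (what is proved, stated in full; the proofs are below) =====
def Claim_equal_leader_array : Prop := ∀ (arr : List Int), Dom_leader_array arr → Spec_leader_array arr (leader_array arr)

-- ===== LEMMAS AND PROOFS =====

-- maximum of x :: xs
def pvMx (x : Int) (xs : List Int) : Int := xs.foldl max x

-- index of the leftmost maximum of x :: xs (= distance from 0 to the first leader)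
def pvFam : Int → List Int → Int
  | _, [] => 0
  | x, y :: ys => if pvMx y ys ≤ x then 0 else 1 + pvFam y ys

-- increasing list of leader indices of the list
def pvLdr : List Int → List Int
  | [] => []
  | x :: xs =>
    match xs with
    | [] => [0]
    | y :: ys => if pvMx y ys ≤ x then 0 :: (pvLdr (y :: ys)).map (· + 1) else (pvLdr (y :: ys)).map (· + 1)

-- the common reference output
def pvOut : List Int → List Int
  | [] => []
  | x :: xs => pvFam x xs :: pvOut xs


lemma pvGetD_cons_succ (x : Int) (xs : List Int) (i : Int) (h : 0 ≤ i) :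
    PySem.List.pyGetD (x :: xs) (i + 1) 0 = PySem.List.pyGetD xs i 0 := by
  obtain ⟨k, rfl⟩ := Int.eq_ofNat_of_zero_le h
  rw [show ((k : Int) + 1) = ((k + 1 : Nat) : Int) by push_cast; ring,
    PySem.List.pyGetD_natCast, PySem.List.pyGetD_natCast]
  simp [List.getD]

lemma rngSplit (n : Nat) :
    PySem.List.pyRange (n : Int) (-1) (-1) = PySem.List.pyRange (n : Int) 0 (-1) ++ [0] := by
  rw [PySem.List.pyRange_neg_one, PySem.List.pyRange_neg_one]
  rw [show ((n : Int) - (-1)).toNat = n + 1 by omega, show ((n : Int) - 0).toNat = n by omega]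
  rw [List.range_succ, List.map_append]
  simp

lemma rngShiftNeg (n : Nat) :
    PySem.List.pyRange (n : Int) 0 (-1) = (PySem.List.pyRange ((n : Int) - 1) (-1) (-1)).map (· + 1) := by
  rw [PySem.List.pyRange_neg_one, PySem.List.pyRange_neg_one, List.map_map]
  rw [show ((n : Int) - 0).toNat = n by omega, show ((n : Int) - 1 - (-1)).toNat = n by omega]
  apply List.map_congr_left
  intro k _
  simp; ring

lemma rngShiftPos (a b : Int) :
    PySem.List.pyRange (a + 1) (b + 1) 1 = (PySem.List.pyRange a b 1).map (· + 1) := by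
  rw [PySem.List.pyRange_one, PySem.List.pyRange_one, List.map_map]
  rw [show (b + 1 - (a + 1)) = b - a by ring]
  apply List.map_congr_left
  intro k _
  simp; ring

lemma pvMx_cons (x y : Int) (ys : List Int) : pvMx x (y :: ys) = max x (pvMx y ys) := by
  show ys.foldl max (max x y) = max x (ys.foldl max y)
  exact List.foldl_assoc

lemma pvFam_nonneg (x : Int) (xs : List Int) : 0 ≤ pvFam x xs := by
  induction xs generalizing x with
  | nil => simp [pvFam]
  | cons y ys ih => simp only [pvFam]; split <;> [omega; exact by have := ih y; omega]

lemma pvFam_get (x : Int) (xs : List Int) :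
    PySem.List.pyGetD (x :: xs) (pvFam x xs) 0 = pvMx x xs := by
  induction xs generalizing x with
  | nil => simp [pvFam, pvMx, PySem.List.pyGetD_zero_cons]
  | cons y ys ih =>
    simp only [pvFam]
    split
    · rw [PySem.List.pyGetD_zero_cons, pvMx_cons]; omega
    · rw [show (1 : Int) + pvFam y ys = pvFam y ys + 1 by ring,
        pvGetD_cons_succ _ _ _ (pvFam_nonneg y ys), ih, pvMx_cons]
      omega

lemma foldlA_shift (x : Int) (xs : List Int) (is : List Int) (his : ∀ i ∈ is, 0 ≤ i)
    (m : Option Int) (j j' : Int) (acc : List Int) (hj : m = none ∨ j' = j + 1) :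
    ((is.map (· + 1)).foldl (pvStepA (x :: xs)) (m, j', acc)).1
        = (is.foldl (pvStepA xs) (m, j, acc)).1
      ∧ ((is.map (· + 1)).foldl (pvStepA (x :: xs)) (m, j', acc)).2.2
        = (is.foldl (pvStepA xs) (m, j, acc)).2.2
      ∧ ((is.foldl (pvStepA xs) (m, j, acc)).1 = none
         ∨ ((is.map (· + 1)).foldl (pvStepA (x :: xs)) (m, j', acc)).2.1
             = (is.foldl (pvStepA xs) (m, j, acc)).2.1 + 1) := by
  induction is generalizing m j j' acc with
  | nil =>
    refine ⟨rfl, rfl, ?_⟩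
    rcases hj with h | h
    · exact Or.inl h
    · exact Or.inr h
  | cons i is ih =>
    have hi : 0 ≤ i := his i (by simp)
    have his' : ∀ i ∈ is, 0 ≤ i := fun a ha => his a (by simp [ha])
    simp only [List.map_cons, List.foldl_cons]
    rw [show pvStepA (x :: xs) (m, j', acc) (i + 1)
        = (if m.all (fun a => a ≤ PySem.List.pyGetD xs i 0)
           then (some (PySem.List.pyGetD xs i 0), i + 1, acc ++ [0])
           else (m, j', acc ++ [j' - (i + 1)])) by
      simp only [pvStepA, pvGetD_cons_succ x xs i hi]]
    rw [show pvStepA xs (m, j, acc) i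
        = (if m.all (fun a => a ≤ PySem.List.pyGetD xs i 0)
           then (some (PySem.List.pyGetD xs i 0), i, acc ++ [0])
           else (m, j, acc ++ [j - i])) from by simp only [pvStepA]]
    rcases hj with hm | hj
    · subst hm
      simp only [Option.all_none]
      exact ih his' _ _ _ _ (Or.inr rfl)
    · split
      · exact ih his' _ _ _ _ (Or.inr rfl)
      · rw [show j' - (i + 1) = j - i by omega]
        exact ih his' _ _ _ _ (Or.inr hj)

lemma SA_char (x : Int) (xs : List Int) :
    (PySem.List.pyRange (xs.length : Int) (-1) (-1)).foldl (pvStepA (x :: xs)) (none, 0, [])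
      = (some (pvMx x xs), pvFam x xs, (pvOut (x :: xs)).reverse) := by
  induction xs generalizing x with
  | nil =>
    rw [show ((List.length [] : Int)) = ((0 : Nat) : Int) by simp, rngSplit 0]
    simp [pvStepA, pvMx, pvFam, pvOut, PySem.List.pyGetD_zero_cons]
  | cons y ys ih =>
    rw [show (((y :: ys).length : Int)) = (((ys.length + 1 : Nat)) : Int) by simp,
      rngSplit (ys.length + 1), List.foldl_append,
      show (((ys.length + 1 : Nat) : Int)) = ((ys.length : Int) + 1) by push_cast; ring]
    rw [show PySem.List.pyRange ((ys.length : Int) + 1) 0 (-1)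
        = (PySem.List.pyRange ((ys.length : Int)) (-1) (-1)).map (· + 1) by
      have := rngShiftNeg (ys.length + 1)
      rw [show (((ys.length + 1 : Nat) : Int)) = ((ys.length : Int) + 1) by push_cast; ring] at this
      simpa using this]
    have hpos : ∀ i ∈ PySem.List.pyRange ((ys.length : Int)) (-1) (-1), 0 ≤ i := by
      intro i hmem
      have := (PySem.List.mem_pyRange_neg_one).mp hmem
      omega
    obtain ⟨h1, h2, h3⟩ := foldlA_shift x (y :: ys)
      (PySem.List.pyRange ((ys.length : Int)) (-1) (-1)) hpos none 0 0 [] (Or.inl rfl)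
    rw [ih y] at h1 h2 h3
    rcases h3 with h3 | h3
    · exact absurd h3 (by simp)
    · set r' := (PySem.List.pyRange ((ys.length : Int)) (-1) (-1)).map (· + 1) with hr'
      have hst : ((r').foldl (pvStepA (x :: y :: ys)) (none, 0, []))
          = (some (pvMx y ys), pvFam y ys + 1, (pvOut (y :: ys)).reverse) := by
        have : ((r').foldl (pvStepA (x :: y :: ys)) (none, 0, []))
            = (((r').foldl (pvStepA (x :: y :: ys)) (none, 0, [])).1,
               ((r').foldl (pvStepA (x :: y :: ys)) (none, 0, [])).2.1,
               ((r').foldl (pvStepA (x :: y :: ys)) (none, 0, [])).2.2) := rfl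
        rw [this, h1, h2, h3]
      rw [hst]
      simp only [List.foldl_cons, List.foldl_nil]
      rw [show pvStepA (x :: y :: ys) (some (pvMx y ys), pvFam y ys + 1, (pvOut (y :: ys)).reverse) 0
          = (if pvMx y ys ≤ x
             then (some x, 0, (pvOut (y :: ys)).reverse ++ [0])
             else (some (pvMx y ys), pvFam y ys + 1, (pvOut (y :: ys)).reverse ++ [pvFam y ys + 1])) by
        simp only [pvStepA, PySem.List.pyGetD_zero_cons, Option.all_some]
        split <;> simp_all]
      have h1fam : (1 : Int) + pvFam y ys = pvFam y ys + 1 := by ring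
      by_cases hc : pvMx y ys ≤ x
      · rw [if_pos hc]
        simp only [pvOut, pvFam, pvMx_cons, if_pos hc, List.reverse_cons, Prod.mk.injEq,
          Option.some.injEq]
        exact ⟨by omega, trivial⟩
      · rw [if_neg hc]
        simp only [pvOut, pvFam, pvMx_cons, if_neg hc, h1fam, List.reverse_cons, Prod.mk.injEq,
          Option.some.injEq]
        exact ⟨by omega, trivial⟩

theorem leader_array_eq_pvOut (arr : List Int) : leader_array arr = pvOut arr := by
  cases arr with
  | nil =>
    simp [leader_array, pvOut]
  | cons x xs =>
    unfold leader_array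
    rw [show (((x :: xs).length : Int) - 1) = ((xs.length : Int)) by push_cast [List.length_cons]; ring]
    rw [SA_char]
    simp [pvOut]

lemma pvLdr_cons_eq (x : Int) (xs : List Int) :
    ∃ rest, pvLdr (x :: xs) = pvFam x xs :: rest := by
  induction xs generalizing x with
  | nil => exact ⟨[], by simp [pvLdr, pvFam]⟩
  | cons y ys ih =>
    obtain ⟨rest, hrest⟩ := ih y
    by_cases hc : pvMx y ys ≤ x
    · exact ⟨(pvLdr (y :: ys)).map (· + 1), by simp [pvLdr, pvFam, hc]⟩
    · refine ⟨rest.map (· + 1), ?_⟩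
      simp only [pvLdr, pvFam, if_neg hc, hrest, List.map_cons]
      rw [show (1 : Int) + pvFam y ys = pvFam y ys + 1 by ring]

lemma foldlL_shift (x : Int) (xs : List Int) (is : List Int) (his : ∀ i ∈ is, 0 ≤ i)
    (L : List Int) (hL : ∀ j ∈ L, 0 ≤ j) :
    (is.map (· + 1)).foldl (pvStepL (x :: xs)) (L.map (· + 1))
      = (is.foldl (pvStepL xs) L).map (· + 1) := by
  induction is generalizing L with
  | nil => rfl
  | cons i is ih =>
    have hi : 0 ≤ i := his i (by simp)
    have his' : ∀ a ∈ is, 0 ≤ a := fun a ha => his a (by simp [ha])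
    simp only [List.map_cons, List.foldl_cons]
    have hstep : pvStepL (x :: xs) (L.map (· + 1)) (i + 1) = (pvStepL xs L i).map (· + 1) := by
      cases L with
      | nil =>
        simp only [List.map_nil, pvStepL]
        rw [if_pos (Or.inl trivial), if_pos (Or.inl trivial)]
        rfl
      | cons a as =>
        obtain ⟨pre, last, hpl⟩ : ∃ pre last, a :: as = pre ++ [last] :=
          ⟨(a :: as).dropLast, (a :: as).getLast (by simp),
            (List.dropLast_append_getLast (by simp)).symm⟩
        rw [hpl]
        have hlast0 : 0 ≤ last := by
          apply hL
          rw [hpl]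
          simp
        simp only [pvStepL, List.map_append, List.map_singleton,
          PySem.List.pyGetD_neg_one_append_singleton]
        rw [pvGetD_cons_succ x xs _ hlast0, pvGetD_cons_succ x xs i hi]
        by_cases hc2 : PySem.List.pyGetD xs last 0 ≤ PySem.List.pyGetD xs i 0
        · rw [if_pos (Or.inr hc2), if_pos (Or.inr hc2)]
          simp
        · have hno : ¬(List.map (fun x => x + 1) pre ++ [last + 1] = ([] : List Int)
              ∨ PySem.List.pyGetD xs last 0 ≤ PySem.List.pyGetD xs i 0) := by
            rintro (h | h)
            · simp at h
            · exact hc2 h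
          have hno' : ¬(pre ++ [last] = ([] : List Int)
              ∨ PySem.List.pyGetD xs last 0 ≤ PySem.List.pyGetD xs i 0) := by
            rintro (h | h)
            · simp at h
            · exact hc2 h
          rw [if_neg hno, if_neg hno']
          simp
    rw [hstep]
    apply ih his'
    intro j hj
    simp only [pvStepL] at hj
    split at hj
    · rcases List.mem_append.mp hj with h | h
      · exact hL j h
      · simp at h; omega
    · exact hL j hj

lemma SB_char (x : Int) (xs : List Int) :
    (PySem.List.pyRange (xs.length : Int) (-1) (-1)).foldl (pvStepL (x :: xs)) []
      = (pvLdr (x :: xs)).reverse := by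
  induction xs generalizing x with
  | nil =>
    rw [show ((List.length [] : Int)) = ((0 : Nat) : Int) by simp, rngSplit 0]
    simp [pvStepL, pvLdr]
  | cons y ys ih =>
    rw [show (((y :: ys).length : Int)) = (((ys.length + 1 : Nat)) : Int) by simp,
      rngSplit (ys.length + 1), List.foldl_append,
      show (((ys.length + 1 : Nat) : Int)) = ((ys.length : Int) + 1) by push_cast; ring]
    rw [show PySem.List.pyRange ((ys.length : Int) + 1) 0 (-1)
        = (PySem.List.pyRange ((ys.length : Int)) (-1) (-1)).map (· + 1) by
      have := rngShiftNeg (ys.length + 1)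
      rw [show (((ys.length + 1 : Nat) : Int)) = ((ys.length : Int) + 1) by push_cast; ring] at this
      simpa using this]
    have hpos : ∀ i ∈ PySem.List.pyRange ((ys.length : Int)) (-1) (-1), 0 ≤ i := by
      intro i hmem
      have := (PySem.List.mem_pyRange_neg_one).mp hmem
      omega
    rw [show ([] : List Int) = ([] : List Int).map (· + 1) from rfl,
      foldlL_shift x (y :: ys) _ hpos [] (by simp), ih y]
    obtain ⟨rest, hrest⟩ := pvLdr_cons_eq y ys
    simp only [List.foldl_cons]
    have hL : ((pvLdr (y :: ys)).reverse).map (· + 1)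
        = (rest.reverse).map (· + 1) ++ [pvFam y ys + 1] := by
      rw [hrest]; simp
    have hcondval : PySem.List.pyGetD (x :: y :: ys) (pvFam y ys + 1) 0 = pvMx y ys := by
      rw [pvGetD_cons_succ _ _ _ (pvFam_nonneg y ys), pvFam_get]
    have hgd : PySem.List.pyGetD (((pvLdr (y :: ys)).reverse).map (· + 1)) (-1) 0
        = pvFam y ys + 1 := by
      rw [hL, PySem.List.pyGetD_neg_one_append_singleton]
    simp only [pvStepL, hgd, hcondval, PySem.List.pyGetD_zero_cons]
    have hne : ((pvLdr (y :: ys)).reverse).map (· + 1) ≠ [] := by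
      rw [hrest]; simp
    by_cases hc : pvMx y ys ≤ x
    · rw [if_pos (Or.inr hc)]
      simp [pvLdr, hc, List.map_reverse]
    · have hno : ¬(List.map (fun x => x + 1) (pvLdr (y :: ys)).reverse = ([] : List Int)
          ∨ pvMx y ys ≤ x) := by
        rintro (h | h)
        · exact hne h
        · exact hc h
      rw [if_neg hno]
      simp [pvLdr, hc, List.map_reverse]

lemma foldl_emit_eq (l : Int) (acc : List Int) (R : List Int) :
    R.foldl (fun x y => x ++ [l + 1 - (y + 1)]) acc = R.foldl (fun o i => o ++ [l - i]) acc := by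
  induction R generalizing acc with
  | nil => rfl
  | cons r rs ih =>
    simp only [List.foldl_cons]
    rw [show l + 1 - (r + 1) = l - r by ring]
    exact ih _

lemma emit_shift (L : List Int) (p : Int) (acc : List Int) :
    (L.map (· + 1)).foldl pvStepE (p + 1, acc) = (fun st => (st.1 + 1, st.2)) (L.foldl pvStepE (p, acc)) := by
  induction L generalizing p acc with
  | nil => rfl
  | cons l ls ih =>
    simp only [List.map_cons, List.foldl_cons]
    have hstep : pvStepE (p + 1, acc) (l + 1) = (fun st => (st.1 + 1, st.2)) (pvStepE (p, acc) l) := by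
      simp only [pvStepE]
      rw [rngShiftPos p (l + 1), List.foldl_map, foldl_emit_eq]
    rw [hstep]
    exact ih (l + 1) _

lemma emit_char (x : Int) (xs : List Int) (acc : List Int) :
    ((pvLdr (x :: xs)).foldl pvStepE (0, acc)).2 = acc ++ pvOut (x :: xs) := by
  induction xs generalizing x acc with
  | nil =>
    simp only [pvLdr, List.foldl_cons, List.foldl_nil, pvOut, pvFam]
    have : pvStepE (0, acc) 0 = (1, acc ++ [0]) := by
      simp [pvStepE]
      decide
    rw [this]
  | cons y ys ih =>
    by_cases hc : pvMx y ys ≤ x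
    · simp only [pvLdr, if_pos hc, List.foldl_cons]
      have hstep : pvStepE (0, acc) 0 = (1, acc ++ [0]) := by
        simp [pvStepE]
        decide
      have hsh := emit_shift (pvLdr (y :: ys)) 0 (acc ++ [0])
      norm_num at hsh
      rw [hstep, hsh]
      dsimp only
      rw [ih y]
      simp [pvOut, pvFam, hc]
    · simp only [pvLdr, if_neg hc]
      have hsh := emit_shift (pvLdr (y :: ys)) (-1) acc
      norm_num at hsh
      rw [hsh]
      dsimp only
      obtain ⟨rest, hrest⟩ := pvLdr_cons_eq y ys
      have hfirst : pvStepE (-1, acc) (pvFam y ys)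
          = pvStepE (0, acc ++ [pvFam y ys + 1]) (pvFam y ys) := by
        simp only [pvStepE]
        rw [PySem.List.pyRange_one_cons (by have := pvFam_nonneg y ys; omega : (-1 : Int) < pvFam y ys + 1)]
        simp only [List.foldl_cons]
        rw [show (-1 : Int) + 1 = 0 by ring, show pvFam y ys - (-1) = pvFam y ys + 1 by ring]
      rw [hrest, List.foldl_cons, hfirst, ← List.foldl_cons, ← hrest, ih y]
      simp only [pvOut, pvFam, if_neg hc]
      rw [show (1 : Int) + pvFam y ys = pvFam y ys + 1 by ring]
      simp

theorem alt_eq_pvOut (arr : List Int) : leader_array_alt arr = pvOut arr := by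
  cases arr with
  | nil => simp [leader_array_alt, pvOut]
  | cons x xs =>
    unfold leader_array_alt
    rw [show (((x :: xs).length : Int) - 1) = ((xs.length : Int)) by push_cast [List.length_cons]; ring]
    rw [SB_char, List.reverse_reverse]
    exact emit_char x xs []

-- ===== VERDICT (by name: the statement is the Claim_ definition above) =====
theorem leader_array_spec : Claim_equal_leader_array := by
  intro arr _
  unfold Spec_leader_array
  rw [leader_array_eq_pvOut, alt_eq_pvOut]
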